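-- pv_equiv track=rewrite | github.com/rohanvinaik/PoT_Experiments | examples/analyze_stubs.py | categorize_stubs
-- ===== SOURCE A (Python) =====
-- from typing import List, Dict, Any, Tuple
--
-- def categorize_stubs(stubs: List[Dict]) -> Dict[str, List[Dict]]:
--     """Categorize stubs by area and priority"""
--     categories = {
--         'security': [],
--         'vision': [],
--         'language_model': [],
--         'core': [],
--         'evaluation': [],
--         'scripts': [],
--         'other': []
--     }
--
--     for stub in stubs:
--         filepath = stub['file']
--
--         # Categorize by file path
--         if 'security' in filepath:
--             categories['security'].append(stub)
--         elif 'vision' in filepath: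
--             categories['vision'].append(stub)
--         elif 'lm' in filepath or 'language' in filepath:
--             categories['language_model'].append(stub)
--         elif 'core' in filepath:
--             categories['core'].append(stub)
--         elif 'eval' in filepath:
--             categories['evaluation'].append(stub)
--         elif 'scripts' in filepath:
--             categories['scripts'].append(stub)
--         else:
--             categories['other'].append(stub)
--
--     return categories
-- ===== SOURCE B (Python) =====
-- def categorize_stubs(stubs):
--     """Categorize stubs by area and priority"""
--     rules = [
--         ('security', lambda f: 'security' in f),
--         ('vision', lambda f: 'vision' in f),
--         ('language_model', lambda f: 'lm' in f or 'language' in f),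
--         ('core', lambda f: 'core' in f),
--         ('evaluation', lambda f: 'eval' in f),
--         ('scripts', lambda f: 'scripts' in f),
--     ]
--     categories = {}
--     remaining = stubs
--     for name, pred in rules:
--         categories[name] = [s for s in remaining if pred(s['file'])]
--         remaining = [s for s in remaining if not pred(s['file'])]
--     categories['other'] = remaining
--     return categories
-- ===== Notes on version B (the rewrite author's own statement) =====
-- stated objective: alternative
-- what changed: Replaces A's per-stub if/elif first-match chain by a sieve of seven staged filtering passes: for each category in priority order, one pass collects the matching stubs from the shrinking 'remaining' list and removes them, and whatever survives all passes is 'other'; correctness rests on filter stability.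
import Mathlib
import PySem

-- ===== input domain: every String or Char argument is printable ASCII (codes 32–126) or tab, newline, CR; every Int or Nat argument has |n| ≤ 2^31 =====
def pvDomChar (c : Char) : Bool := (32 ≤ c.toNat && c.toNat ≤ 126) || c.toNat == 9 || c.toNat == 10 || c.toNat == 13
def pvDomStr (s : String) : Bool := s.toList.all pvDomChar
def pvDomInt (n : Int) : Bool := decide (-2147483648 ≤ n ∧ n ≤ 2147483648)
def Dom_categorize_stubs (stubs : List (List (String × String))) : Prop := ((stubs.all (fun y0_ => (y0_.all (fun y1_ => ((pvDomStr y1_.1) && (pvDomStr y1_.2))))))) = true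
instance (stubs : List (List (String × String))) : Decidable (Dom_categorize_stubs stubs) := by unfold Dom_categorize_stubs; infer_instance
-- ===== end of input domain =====

-- B replaces A's per-stub if/elif first-match chain by seven staged filtering passes over a
-- shrinking 'remaining' list (alternative decomposition, same cost); equal by filter stability.


-- ===== PORT A =====
-- stub['file']: first-match lookup in the association list (KeyError excluded by Pre_,
-- so .getD "" is never the default on admitted inputs).
def pvFile (stub : List (String × String)) : String := (stub.lookup "file").getD ""

-- A's loop body: the if/elif chain appending into the categories dict.
def pvStepA (cats : PySem.Dict String (List (List (String × String))))
    (stub : List (String × String)) : PySem.Dict String (List (List (String × String))) :=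
  let filepath := pvFile stub
  if PySem.Str.isIn "security" filepath then PySem.Dict.modify cats "security" [] (· ++ [stub])
  else if PySem.Str.isIn "vision" filepath then PySem.Dict.modify cats "vision" [] (· ++ [stub])
  else if PySem.Str.isIn "lm" filepath || PySem.Str.isIn "language" filepath then
    PySem.Dict.modify cats "language_model" [] (· ++ [stub])
  else if PySem.Str.isIn "core" filepath then PySem.Dict.modify cats "core" [] (· ++ [stub])
  else if PySem.Str.isIn "eval" filepath then PySem.Dict.modify cats "evaluation" [] (· ++ [stub])
  else if PySem.Str.isIn "scripts" filepath then PySem.Dict.modify cats "scripts" [] (· ++ [stub])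
  else PySem.Dict.modify cats "other" [] (· ++ [stub])

def categorize_stubs (stubs : List (List (String × String))) : List (String × List (List (String × String))) :=
  (stubs.foldl pvStepA
    (PySem.Dict.ofList
      [("security", []), ("vision", []), ("language_model", []), ("core", []),
       ("evaluation", []), ("scripts", []), ("other", [])])).items

-- ===== PORT B =====
-- B's ordered rule table: category name -> predicate on the file path.
def pvRules : List (String × (String → Bool)) :=
  [("security", fun f => PySem.Str.isIn "security" f),
   ("vision", fun f => PySem.Str.isIn "vision" f),
   ("language_model", fun f => PySem.Str.isIn "lm" f || PySem.Str.isIn "language" f),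
   ("core", fun f => PySem.Str.isIn "core" f),
   ("evaluation", fun f => PySem.Str.isIn "eval" f),
   ("scripts", fun f => PySem.Str.isIn "scripts" f)]

-- B's loop over the rules: one filtering pass collects a category, one removes it from 'remaining'.
def pvStepB (st : PySem.Dict String (List (List (String × String))) × List (List (String × String)))
    (rule : String × (String → Bool)) :
    PySem.Dict String (List (List (String × String))) × List (List (String × String)) :=
  (st.1.insert rule.1 (st.2.filter (fun s => rule.2 (pvFile s))),
   st.2.filter (fun s => ! rule.2 (pvFile s)))

def categorize_stubs_alt (stubs : List (List (String × String))) : List (String × List (List (String × String))) :=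
  let st := pvRules.foldl pvStepB (PySem.Dict.empty, stubs)
  (st.1.insert "other" st.2).items

-- ===== PRECONDITION & SPEC =====
-- Pre_ excludes exactly the stubs without a 'file' key, where A (and B) raise KeyError.
def Pre_categorize_stubs (stubs : List (List (String × String))) : Prop :=
  (stubs.all (fun stub => (stub.lookup "file").isSome)) = true
instance (stubs : List (List (String × String))) : Decidable (Pre_categorize_stubs stubs) := by
  unfold Pre_categorize_stubs; infer_instance
def pvWitness_categorize_stubs : (List (List (String × String))) :=
  [[("file", "src/security/audit.py")], [("file", "notes.txt")]]
def Spec_categorize_stubs (stubs : List (List (String × String))) (out : List (String × List (List (String × String)))) : Prop := out = categorize_stubs_alt stubs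
instance (stubs : List (List (String × String))) (out : List (String × List (List (String × String)))) : Decidable (Spec_categorize_stubs stubs out) := by unfold Spec_categorize_stubs; infer_instance

-- ===== CLAIM (what is proved, stated in full; the proofs are below) =====
def Claim_equal_categorize_stubs : Prop := ∀ (stubs : List (List (String × String))), Dom_categorize_stubs stubs → Pre_categorize_stubs stubs → Spec_categorize_stubs stubs (categorize_stubs stubs)

-- ===== LEMMAS AND PROOFS =====
-- The six keyword tests, as Bool predicates on a stub.
def pvP1 (s : List (String × String)) : Bool := PySem.Str.isIn "security" (pvFile s)
def pvP2 (s : List (String × String)) : Bool := PySem.Str.isIn "vision" (pvFile s)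
def pvP3 (s : List (String × String)) : Bool := PySem.Str.isIn "lm" (pvFile s) || PySem.Str.isIn "language" (pvFile s)
def pvP4 (s : List (String × String)) : Bool := PySem.Str.isIn "core" (pvFile s)
def pvP5 (s : List (String × String)) : Bool := PySem.Str.isIn "eval" (pvFile s)
def pvP6 (s : List (String × String)) : Bool := PySem.Str.isIn "scripts" (pvFile s)

-- The common normal form both programs compute: seven disjoint filters of the input,
-- each selecting the stubs won by that category under first-match priority.
def pvNF (stubs : List (List (String × String))) (a b c d e f g : List (List (String × String))) :
    List (String × List (List (String × String))) :=
  [("security", a ++ stubs.filter pvP1),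
   ("vision", b ++ stubs.filter (fun s => !pvP1 s && pvP2 s)),
   ("language_model", c ++ stubs.filter (fun s => !pvP1 s && !pvP2 s && pvP3 s)),
   ("core", d ++ stubs.filter (fun s => !pvP1 s && !pvP2 s && !pvP3 s && pvP4 s)),
   ("evaluation", e ++ stubs.filter (fun s => !pvP1 s && !pvP2 s && !pvP3 s && !pvP4 s && pvP5 s)),
   ("scripts", f ++ stubs.filter (fun s => !pvP1 s && !pvP2 s && !pvP3 s && !pvP4 s && !pvP5 s && pvP6 s)),
   ("other", g ++ stubs.filter (fun s => !pvP1 s && !pvP2 s && !pvP3 s && !pvP4 s && !pvP5 s && !pvP6 s))]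

-- A's chain step on the seven-list state, written with the pvP predicates.
theorem stepA_eq (a b c d e f g : List (List (String × String))) (x : List (String × String)) :
    pvStepA (PySem.Dict.mk [("security", a), ("vision", b), ("language_model", c), ("core", d),
                            ("evaluation", e), ("scripts", f), ("other", g)]) x =
    if pvP1 x then PySem.Dict.mk [("security", a ++ [x]), ("vision", b), ("language_model", c), ("core", d), ("evaluation", e), ("scripts", f), ("other", g)]
    else if pvP2 x then PySem.Dict.mk [("security", a), ("vision", b ++ [x]), ("language_model", c), ("core", d), ("evaluation", e), ("scripts", f), ("other", g)]
    else if pvP3 x then PySem.Dict.mk [("security", a), ("vision", b), ("language_model", c ++ [x]), ("core", d), ("evaluation", e), ("scripts", f), ("other", g)]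
    else if pvP4 x then PySem.Dict.mk [("security", a), ("vision", b), ("language_model", c), ("core", d ++ [x]), ("evaluation", e), ("scripts", f), ("other", g)]
    else if pvP5 x then PySem.Dict.mk [("security", a), ("vision", b), ("language_model", c), ("core", d), ("evaluation", e ++ [x]), ("scripts", f), ("other", g)]
    else if pvP6 x then PySem.Dict.mk [("security", a), ("vision", b), ("language_model", c), ("core", d), ("evaluation", e), ("scripts", f ++ [x]), ("other", g)]
    else PySem.Dict.mk [("security", a), ("vision", b), ("language_model", c), ("core", d), ("evaluation", e), ("scripts", f), ("other", g ++ [x])] := by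
  simp only [pvStepA, pvP1, pvP2, pvP3, pvP4, pvP5, pvP6]
  split_ifs <;> rfl

-- A's fold, from any seven-list state, produces the normal form appended onto that state.
theorem foldA_items (stubs : List (List (String × String))) :
    ∀ a b c d e f g,
    (stubs.foldl pvStepA
      (PySem.Dict.mk [("security", a), ("vision", b), ("language_model", c), ("core", d),
                      ("evaluation", e), ("scripts", f), ("other", g)])).items
    = pvNF stubs a b c d e f g := by
  induction stubs with
  | nil => intro a b c d e f g; simp [pvNF]
  | cons x xs ih =>
    intro a b c d e f g
    rw [List.foldl_cons, stepA_eq]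
    by_cases h1 : pvP1 x
    · rw [if_pos h1, ih]; simp [pvNF, h1]
    · rw [if_neg h1]; rw [Bool.not_eq_true] at h1
      by_cases h2 : pvP2 x
      · rw [if_pos h2, ih]; simp [pvNF, h1, h2]
      · rw [if_neg h2]; rw [Bool.not_eq_true] at h2
        by_cases h3 : pvP3 x
        · rw [if_pos h3, ih]; simp [pvNF, h1, h2, h3]
        · rw [if_neg h3]; rw [Bool.not_eq_true] at h3
          by_cases h4 : pvP4 x
          · rw [if_pos h4, ih]; simp [pvNF, h1, h2, h3, h4]
          · rw [if_neg h4]; rw [Bool.not_eq_true] at h4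
            by_cases h5 : pvP5 x
            · rw [if_pos h5, ih]; simp [pvNF, h1, h2, h3, h4, h5]
            · rw [if_neg h5]; rw [Bool.not_eq_true] at h5
              by_cases h6 : pvP6 x
              · rw [if_pos h6, ih]; simp [pvNF, h1, h2, h3, h4, h5, h6]
              · rw [if_neg h6]; rw [Bool.not_eq_true] at h6
                rw [ih]; simp [pvNF, h1, h2, h3, h4, h5, h6]

-- B's staged sieve also produces the normal form: composing the stability-preserving
-- removal passes yields exactly the first-match filters.
theorem altB_items (stubs : List (List (String × String))) :
    categorize_stubs_alt stubs = pvNF stubs [] [] [] [] [] [] [] := by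
  rw [show categorize_stubs_alt stubs =
    [("security", stubs.filter pvP1),
     ("vision", (stubs.filter (fun s => !pvP1 s)).filter pvP2),
     ("language_model", ((stubs.filter (fun s => !pvP1 s)).filter (fun s => !pvP2 s)).filter pvP3),
     ("core", (((stubs.filter (fun s => !pvP1 s)).filter (fun s => !pvP2 s)).filter (fun s => !pvP3 s)).filter pvP4),
     ("evaluation", ((((stubs.filter (fun s => !pvP1 s)).filter (fun s => !pvP2 s)).filter (fun s => !pvP3 s)).filter (fun s => !pvP4 s)).filter pvP5),
     ("scripts", (((((stubs.filter (fun s => !pvP1 s)).filter (fun s => !pvP2 s)).filter (fun s => !pvP3 s)).filter (fun s => !pvP4 s)).filter (fun s => !pvP5 s)).filter pvP6),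
     ("other", (((((stubs.filter (fun s => !pvP1 s)).filter (fun s => !pvP2 s)).filter (fun s => !pvP3 s)).filter (fun s => !pvP4 s)).filter (fun s => !pvP5 s)).filter (fun s => !pvP6 s))]
    from rfl]
  simp only [pvNF, List.filter_filter, List.nil_append]
  simp only [Bool.and_comm, Bool.and_assoc]

-- ===== VERDICT (by name: the statement is the Claim_ definition above) =====
theorem categorize_stubs_spec : Claim_equal_categorize_stubs := by
  intro stubs _ _
  unfold Spec_categorize_stubs categorize_stubs
  rw [show (PySem.Dict.ofList
      [("security", ([] : List (List (String × String)))), ("vision", []), ("language_model", []), ("core", []),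
       ("evaluation", []), ("scripts", []), ("other", [])]) = PySem.Dict.mk
      [("security", []), ("vision", []), ("language_model", []), ("core", []),
       ("evaluation", []), ("scripts", []), ("other", [])] from rfl]
  rw [foldA_items, altB_items]
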